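-- pv_equiv track=rewrite | github.com/delena0702/Algorithm-Problem | BAEKJOON/1416_팬_서비스.py | make_cnt
-- ===== SOURCE A (Python) =====
-- def make_cnt(nums, k):
--     if k == 0:
--         return {0: 1}
--
--     if k == 1:
--         retval = {}
--         for num in nums:
--             retval[num] = 1
--         return retval
--
--     retval, arr = {}, make_cnt(nums, k // 2)
--     for a, ac in arr.items():
--         for b, bc in arr.items():
--             retval[a + b] = (retval.get(a + b, 0) + ac * bc) % MOD
--
--     if k % 2 == 0:
--         return retval
--
--     retval, arr = {}, retval
--     for a, ac in arr.items():
--         for num in nums: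
--             retval[a + num] = (retval.get(a + num, 0) + ac) % MOD
--     return retval
--
-- MOD = 999_983
-- ===== SOURCE B (Python) =====
-- MOD = 999_983
--
--
-- def _square(d):
--     out = {}
--     for a, ac in d.items():
--         for b, bc in d.items():
--             s = a + b
--             out[s] = (out.get(s, 0) + ac * bc) % MOD
--     return out
--
--
-- def _mul_nums(d, nums):
--     out = {}
--     for a, ac in d.items():
--         for num in nums:
--             s = a + num
--             out[s] = (out.get(s, 0) + ac) % MOD
--     return out
--
--
-- def make_cnt(nums, k):
--     # iterative left-to-right binary exponentiation over the bits of k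
--     if k == 0:
--         return {0: 1}
--     res = {num: 1 for num in nums}
--     for bit in bin(k)[3:]:
--         res = _square(res)
--         if bit == '1':
--             res = _mul_nums(res, nums)
--     return res
-- ===== Notes on version B (the rewrite author's own statement) =====
-- stated objective: alternative
-- what changed: Replaces A's top-down recursion on k//2 by an iterative left-to-right binary-exponentiation loop over the bits of k, with the squaring and multiply-by-nums convolutions factored into named helpers instead of inlined nested loops.
import Mathlib
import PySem

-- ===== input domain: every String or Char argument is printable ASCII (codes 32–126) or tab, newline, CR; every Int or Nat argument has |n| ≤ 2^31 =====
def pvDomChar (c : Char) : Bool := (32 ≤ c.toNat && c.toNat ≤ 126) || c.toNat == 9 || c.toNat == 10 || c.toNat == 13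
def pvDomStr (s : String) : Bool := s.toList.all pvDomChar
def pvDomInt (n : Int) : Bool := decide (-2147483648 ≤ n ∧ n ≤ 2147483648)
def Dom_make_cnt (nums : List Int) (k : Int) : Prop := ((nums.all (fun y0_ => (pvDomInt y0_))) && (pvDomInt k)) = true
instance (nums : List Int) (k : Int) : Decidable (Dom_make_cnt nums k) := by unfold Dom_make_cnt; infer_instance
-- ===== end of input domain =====

-- B replaces A's recursion on k//2 by an iterative left-to-right loop over the bits of k
-- (binary exponentiation with the two convolutions as named helpers); same result, same cost.

-- ===== PORT A =====
-- A recurses on k (k -> k // 2, bottoming at 0/1); on the claimed domain k ≥ 0, so the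
-- recursion is carried by an auxiliary on k.toNat (a totality guard only, same computation).
def make_cntAux (nums : List Int) (n : Nat) : PySem.Dict Int Int :=
  if n = 0 then PySem.Dict.ofList [(0, 1)]
  else if n = 1 then
    nums.foldl (fun retval num => retval.insert num 1) PySem.Dict.empty
  else
    let arr := make_cntAux nums (n / 2)
    let retval :=
      arr.items.foldl (fun retval p =>
        arr.items.foldl (fun retval q =>
          retval.insert (p.1 + q.1)
            (PySem.Int.mod (retval.getD (p.1 + q.1) 0 + p.2 * q.2) 999983)) retval)
        PySem.Dict.empty
    if n % 2 = 0 then retval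
    else
      retval.items.foldl (fun retval2 p =>
        nums.foldl (fun retval2 num =>
          retval2.insert (p.1 + num)
            (PySem.Int.mod (retval2.getD (p.1 + num) 0 + p.2) 999983)) retval2)
        PySem.Dict.empty
termination_by n
decreasing_by exact Nat.div_lt_self (by omega) (by omega)

def make_cnt (nums : List Int) (k : Int) : List (Int × Int) :=
  (make_cntAux nums k.toNat).items

-- ===== PORT B =====
def bSquare (d : PySem.Dict Int Int) : PySem.Dict Int Int :=
  d.items.foldl (fun out p =>
    d.items.foldl (fun out q =>
      out.insert (p.1 + q.1)
        (PySem.Int.mod (out.getD (p.1 + q.1) 0 + p.2 * q.2) 999983)) out)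
    PySem.Dict.empty

def bMulNums (d : PySem.Dict Int Int) (nums : List Int) : PySem.Dict Int Int :=
  d.items.foldl (fun out p =>
    nums.foldl (fun out num =>
      out.insert (p.1 + num)
        (PySem.Int.mod (out.getD (p.1 + num) 0 + p.2) 999983)) out)
    PySem.Dict.empty

-- bin(k)[3:]: the binary digits of k below the most significant bit, MSB first.
def bitsBelowMSB (n : Nat) : List Bool :=
  if n ≤ 1 then []
  else bitsBelowMSB (n / 2) ++ [decide (n % 2 = 1)]
termination_by n
decreasing_by exact Nat.div_lt_self (by omega) (by omega)

def make_cnt_alt (nums : List Int) (k : Int) : List (Int × Int) :=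
  if k = 0 then [(0, 1)]
  else
    let base := nums.foldl (fun d num => d.insert num 1) PySem.Dict.empty
    ((bitsBelowMSB k.toNat).foldl
      (fun res bit =>
        let res := bSquare res
        if bit then bMulNums res nums else res)
      base).items

-- ===== PRECONDITION & SPEC =====
-- Pre_ excludes only k < 0, where Python A recurses forever on k // 2 (RecursionError: A never returns).
def Pre_make_cnt (nums : List Int) (k : Int) : Prop := 0 ≤ k
instance (nums : List Int) (k : Int) : Decidable (Pre_make_cnt nums k) := by unfold Pre_make_cnt; infer_instance
def pvWitness_make_cnt : List Int × Int := ([1, 2], 3)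

def Spec_make_cnt (nums : List Int) (k : Int) (out : List (Int × Int)) : Prop := out = make_cnt_alt nums k
instance (nums : List Int) (k : Int) (out : List (Int × Int)) : Decidable (Spec_make_cnt nums k out) := by unfold Spec_make_cnt; infer_instance

-- ===== CLAIM (what is proved, stated in full; the proofs are below) =====
def Claim_equal_make_cnt : Prop := ∀ (nums : List Int) (k : Int), Dom_make_cnt nums k → Pre_make_cnt nums k → Spec_make_cnt nums k (make_cnt nums k)

-- ===== LEMMAS AND PROOFS =====

-- B's loop step, named for the induction.
def bStep (nums : List Int) (res : PySem.Dict Int Int) (bit : Bool) : PySem.Dict Int Int :=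
  let res := bSquare res
  if bit then bMulNums res nums else res

def bBase (nums : List Int) : PySem.Dict Int Int :=
  nums.foldl (fun d num => d.insert num 1) PySem.Dict.empty

lemma make_cntAux_ge_two (nums : List Int) (n : Nat) (h : 2 ≤ n) :
    make_cntAux nums n =
      (if n % 2 = 0 then bSquare (make_cntAux nums (n / 2))
       else bMulNums (bSquare (make_cntAux nums (n / 2))) nums) := by
  rw [make_cntAux]
  simp only [show ¬ n = 0 by omega, show ¬ n = 1 by omega, if_false]
  rfl

lemma bitsBelowMSB_ge_two (n : Nat) (h : 2 ≤ n) :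
    bitsBelowMSB n = bitsBelowMSB (n / 2) ++ [decide (n % 2 = 1)] := by
  rw [bitsBelowMSB]
  simp [show ¬ n ≤ 1 by omega]

-- A's recursion computes B's left-to-right fold over the bits of n, for every n ≥ 1.
lemma aux_eq_fold (nums : List Int) :
    ∀ n : Nat, 1 ≤ n →
      make_cntAux nums n = (bitsBelowMSB n).foldl (bStep nums) (bBase nums) := by
  intro n
  induction n using Nat.strong_induction_on with
  | _ n ih =>
    intro h1
    by_cases h2 : n = 1
    · subst h2
      rw [bitsBelowMSB]
      simp only [List.foldl_nil, le_refl, if_true]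
      rw [make_cntAux]
      rfl
    · have hge : 2 ≤ n := by omega
      have hhalf : 1 ≤ n / 2 := Nat.one_le_div_iff (by omega) |>.mpr (by omega)
      rw [make_cntAux_ge_two nums n hge, bitsBelowMSB_ge_two n hge,
          List.foldl_append,
          ← ih (n / 2) (Nat.div_lt_self (by omega) (by omega)) hhalf]
      simp only [List.foldl_cons, List.foldl_nil, bStep]
      by_cases hpar : n % 2 = 0
      · simp [hpar]
      · simp [show n % 2 = 1 by omega]

-- ===== VERDICT (by name: the statement is the Claim_ definition above) =====
theorem make_cnt_spec : Claim_equal_make_cnt := by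
  intro nums k _ hk
  have hk' : (0 : Int) ≤ k := hk
  unfold Spec_make_cnt make_cnt make_cnt_alt
  by_cases h0 : k = 0
  · subst h0
    rw [if_pos rfl, Int.toNat_zero, make_cntAux]
    rfl
  · have h1 : 1 ≤ k.toNat := by omega
    rw [if_neg h0, aux_eq_fold nums k.toNat h1]
    rfl
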